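-- pv_equiv track=rewrite | github.com/Independent-Dev/PS | algorithm/inflearn_lecture/4_binary_search_and_greedy/04_barn.py | Count
-- ===== SOURCE A (Python) =====
-- def Count(mid, barn_gap):
--     result = 1
--     temp = 0
--     for gap in barn_gap:
--         if temp + gap >= mid:
--             result += 1
--             temp = 0
--         else:
--             temp += gap
--     return result
-- ===== SOURCE B (Python) =====
-- def Count(mid, barn_gap):
--     # Precompute absolute barn positions (prefix sums), then run the standard
--     # aggressive-cows greedy tracking the last placed absolute position.
--     positions = []
--     pos = 0
--     for gap in barn_gap:
--         pos += gap
--         positions.append(pos)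
--     result = 1
--     last = 0
--     for p in positions:
--         if p - last >= mid:
--             result += 1
--             last = p
--     return result
-- ===== Notes on version B (the rewrite author's own statement) =====
-- stated objective: idiomatic
-- what changed: Replaces the reset-accumulator greedy by the standard aggressive-cows formulation: first build the absolute positions by prefix sums, then greedily place whenever position minus last placed position reaches mid.
import Mathlib
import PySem

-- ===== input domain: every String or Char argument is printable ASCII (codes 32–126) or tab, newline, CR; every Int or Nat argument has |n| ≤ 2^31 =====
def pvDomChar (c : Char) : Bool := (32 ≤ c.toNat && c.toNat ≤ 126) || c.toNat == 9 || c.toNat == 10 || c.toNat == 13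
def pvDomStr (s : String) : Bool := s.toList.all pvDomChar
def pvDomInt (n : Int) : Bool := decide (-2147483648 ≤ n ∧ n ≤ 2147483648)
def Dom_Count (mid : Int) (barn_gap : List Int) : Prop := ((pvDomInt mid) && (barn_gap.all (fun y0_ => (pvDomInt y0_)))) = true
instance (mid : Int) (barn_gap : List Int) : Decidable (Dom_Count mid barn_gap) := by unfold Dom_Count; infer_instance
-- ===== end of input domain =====

-- B rewrites the reset-accumulator greedy as the standard aggressive-cows greedy:
-- precompute absolute positions (prefix sums), then place whenever pos - last ≥ mid (idiomatic).

-- ===== PORT A =====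
def Count (mid : Int) (barn_gap : List Int) : Int :=
  (barn_gap.foldl
    (fun (s : Int × Int) gap =>
      if s.2 + gap ≥ mid then (s.1 + 1, 0) else (s.1, s.2 + gap))
    (1, 0)).1

-- ===== PORT B =====
def Count_alt (mid : Int) (barn_gap : List Int) : Int :=
  let positions :=
    (barn_gap.foldl
      (fun (s : List Int × Int) gap => (s.1 ++ [s.2 + gap], s.2 + gap))
      ([], 0)).1
  (positions.foldl
    (fun (s : Int × Int) p =>
      if p - s.2 ≥ mid then (s.1 + 1, p) else s)
    (1, 0)).1

-- ===== PRECONDITION & SPEC =====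
def Spec_Count (mid : Int) (barn_gap : List Int) (out : Int) : Prop := out = Count_alt mid barn_gap
instance (mid : Int) (barn_gap : List Int) (out : Int) : Decidable (Spec_Count mid barn_gap out) := by unfold Spec_Count; infer_instance

-- ===== CLAIM (what is proved, stated in full; the proofs are below) =====
def Claim_equal_Count : Prop := ∀ (mid : Int) (barn_gap : List Int), Dom_Count mid barn_gap → Spec_Count mid barn_gap (Count mid barn_gap)

-- ===== LEMMAS AND PROOFS =====

/-- Prefix sums of `l` starting from base `base` (spec of B's first loop). -/
def prefixSums (base : Int) : List Int → List Int
  | [] => []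
  | g :: t => (base + g) :: prefixSums (base + g) t

theorem posFold_eq (l : List Int) : ∀ (acc : List Int) (base : Int),
    (l.foldl (fun (s : List Int × Int) gap => (s.1 ++ [s.2 + gap], s.2 + gap)) (acc, base)).1
      = acc ++ prefixSums base l := by
  induction l with
  | nil => intro acc base; simp [prefixSums]
  | cons g t ih =>
      intro acc base
      simp only [List.foldl, prefixSums]
      rw [ih]
      simp

theorem fold_agree (mid : Int) (l : List Int) : ∀ (r base last : Int),
    (l.foldl (fun (s : Int × Int) gap =>
        if s.2 + gap ≥ mid then (s.1 + 1, 0) else (s.1, s.2 + gap)) (r, base - last)).1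
      = ((prefixSums base l).foldl (fun (s : Int × Int) p =>
          if p - s.2 ≥ mid then (s.1 + 1, p) else s) (r, last)).1 := by
  induction l with
  | nil => intro r base last; simp [prefixSums]
  | cons g t ih =>
      intro r base last
      simp only [List.foldl, prefixSums]
      by_cases h : base - last + g ≥ mid
      · have h' : base + g - last ≥ mid := by omega
        simp only [if_pos h, if_pos h']
        have hih := ih (r + 1) (base + g) (base + g)
        rw [sub_self] at hih
        exact hih
      · have h' : ¬ base + g - last ≥ mid := by omega
        simp only [if_neg h, if_neg h']
        have hih := ih r (base + g) last
        have e : base + g - last = base - last + g := by ring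
        rw [e] at hih
        exact hih

-- ===== VERDICT (by name: the statement is the Claim_ definition above) =====
theorem Count_spec : Claim_equal_Count := by
  intro mid barn_gap _
  unfold Spec_Count Count Count_alt
  rw [posFold_eq barn_gap [] 0]
  simp only [List.nil_append]
  have := fold_agree mid barn_gap 1 0 0
  simpa using this
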